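-- pv_equiv track=rewrite | github.com/pradyGn/ascii-art-generator | src/print_ascii_in_terminal.py | detect_cont_string
-- ===== SOURCE A (Python) =====
-- def detect_cont_string(ascii_line_str):
--     """
--     Returns the positions of a continous non-blank string.
--
--     Args:
--         ascii_line_str (str): Single line of an ascii art str
--
--     Returns:
--         (List[List[int, int]]): Start and end position of the continous non-blank string.
--     """
--
--     str_pos_lis = []
--     for i, c in enumerate(ascii_line_str):
--         if c != " ":
--             str_pos_lis.append(i)
--
--     if len(str_pos_lis) == 0:
--         return str_pos_lis
--
--     str_grp_lis = [[str_pos_lis[0]]]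
--     for i, v in enumerate(str_pos_lis):
--         if i != 0:
--             if v - 1 != str_pos_lis[i-1]:
--                 str_grp_lis[-1].append(str_pos_lis[i-1])
--                 str_grp_lis.append([v])
--
--     str_grp_lis[-1].append(str_pos_lis[-1])
--
--     return str_grp_lis
-- ===== SOURCE B (Python) =====
-- def detect_cont_string(ascii_line_str):
--     runs = []
--     start = None
--     for i, c in enumerate(ascii_line_str):
--         if c != " ":
--             if start is None:
--                 start = i
--         elif start is not None:
--             runs.append([start, i - 1])
--             start = None
--     if start is not None:
--         runs.append([start, len(ascii_line_str) - 1])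
--     return runs
-- ===== Notes on version B (the rewrite author's own statement) =====
-- stated objective: faster
-- what changed: Replaces A's two-phase approach (collect all non-space indices into a list, then group consecutive ones with index lookbacks and last-group mutation) by a single pass over the string with a run-start tracker that emits each [start, end] pair as soon as the run closes, avoiding the intermediate index list.
import Mathlib
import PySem

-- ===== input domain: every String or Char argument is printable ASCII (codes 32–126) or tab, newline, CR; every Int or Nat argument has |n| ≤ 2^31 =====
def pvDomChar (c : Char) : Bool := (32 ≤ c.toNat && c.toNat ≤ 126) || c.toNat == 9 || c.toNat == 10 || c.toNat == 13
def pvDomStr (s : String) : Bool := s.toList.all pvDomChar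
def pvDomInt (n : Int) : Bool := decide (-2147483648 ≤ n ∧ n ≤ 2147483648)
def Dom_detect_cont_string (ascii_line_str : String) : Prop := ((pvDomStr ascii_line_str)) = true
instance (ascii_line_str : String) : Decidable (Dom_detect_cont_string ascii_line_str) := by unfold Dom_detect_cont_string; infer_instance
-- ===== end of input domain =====

-- B replaces A's two-phase index-collect-then-group scheme with a single pass carrying a
-- run-start tracker, skipping the intermediate index list (objective: faster, constant-factor,
-- measured).

-- ===== PORT A =====
-- str_grp_lis[-1].append(x) : append x to the last inner list (list is nonempty there)
def pvUpdLast (g : List (List Int)) (x : Int) : List (List Int) :=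
  match g with
  | [] => []
  | [a] => [a ++ [x]]
  | a :: rest => a :: pvUpdLast rest x

def detect_cont_string (ascii_line_str : String) : List (List Int) :=
  let str_pos_lis : List Int :=
    (PySem.List.enumerate ascii_line_str.toList 0).foldl
      (fun acc ic => if ic.2 ≠ ' ' then acc ++ [ic.1] else acc) []
  match str_pos_lis with
  | [] => []   -- 'return str_pos_lis' (which is the empty list here)
  | p0 :: _ =>
    -- str_pos_lis[i-1] and str_pos_lis[-1] are always in range here, so pyGetD is exact
    let grp :=
      (PySem.List.enumerate str_pos_lis 0).foldl
        (fun grp iv =>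
          if iv.1 ≠ 0 then
            if iv.2 - 1 ≠ PySem.List.pyGetD str_pos_lis (iv.1 - 1) 0 then
              pvUpdLast grp (PySem.List.pyGetD str_pos_lis (iv.1 - 1) 0) ++ [[iv.2]]
            else grp
          else grp)
        [[p0]]
    pvUpdLast grp (PySem.List.pyGetD str_pos_lis (-1) 0)

-- ===== PORT B =====
def detect_cont_string_alt (ascii_line_str : String) : List (List Int) :=
  let r :=
    (PySem.List.enumerate ascii_line_str.toList 0).foldl
      (fun (st : Option Int × List (List Int)) (ic : Int × Char) =>
        if ic.2 ≠ ' ' then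
          match st.1 with
          | none => (some ic.1, st.2)
          | some _ => st
        else
          match st.1 with
          | some a => (none, st.2 ++ [[a, ic.1 - 1]])
          | none => st)
      (none, [])
  match r.1 with
  | some a => r.2 ++ [[a, (ascii_line_str.toList.length : Int) - 1]]
  | none => r.2

-- ===== PRECONDITION & SPEC =====
def Spec_detect_cont_string (ascii_line_str : String) (out : List (List Int)) : Prop := out = detect_cont_string_alt ascii_line_str
instance (ascii_line_str : String) (out : List (List Int)) : Decidable (Spec_detect_cont_string ascii_line_str out) := by unfold Spec_detect_cont_string; infer_instance

-- ===== CLAIM (what is proved, stated in full; the proofs are below) =====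
def Claim_equal_detect_cont_string : Prop := ∀ (ascii_line_str : String), Dom_detect_cont_string ascii_line_str → Spec_detect_cont_string ascii_line_str (detect_cont_string ascii_line_str)

-- ===== LEMMAS AND PROOFS =====

-- positions of non-space characters, scanning from index i
def pvPos (i : Int) : List Char → List Int
  | [] => []
  | c :: cs => if c ≠ ' ' then i :: pvPos (i + 1) cs else pvPos (i + 1) cs

-- canonical runs: "inside a run started at st whose last seen position is prev, scanning from i"
def pvF (st prev i : Int) : List Char → List (List Int)
  | [] => [[st, prev]]
  | c :: cs =>
    if c ≠ ' ' then
      if i - 1 ≠ prev then [st, prev] :: pvF i i (i + 1) cs else pvF st i (i + 1) cs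
    else pvF st prev (i + 1) cs

-- canonical runs: "outside any run, scanning from i"
def pvRuns (i : Int) : List Char → List (List Int)
  | [] => []
  | c :: cs => if c ≠ ' ' then pvF i i (i + 1) cs else pvRuns (i + 1) cs

-- last non-space position from i, default prev
def pvLastPos (prev i : Int) : List Char → Int
  | [] => prev
  | c :: cs => if c ≠ ' ' then pvLastPos i (i + 1) cs else pvLastPos prev (i + 1) cs

-- A's grouping loop, as a recursion carrying the previous position
def pvGGo (prev : Int) (grp : List (List Int)) : List Int → List (List Int)
  | [] => grp
  | v :: vs =>
    if v - 1 ≠ prev then pvGGo v (pvUpdLast grp prev ++ [[v]]) vs else pvGGo v grp vs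

theorem pvPos_fold (cs : List Char) : ∀ (i : Int) (acc : List Int),
    (PySem.List.enumerate cs i).foldl
      (fun acc ic => if ic.2 ≠ ' ' then acc ++ [ic.1] else acc) acc = acc ++ pvPos i cs := by
  induction cs with
  | nil => intro i acc; simp [pvPos, PySem.List.enumerate_nil]
  | cons c cs ih =>
    intro i acc
    simp only [PySem.List.enumerate_cons, List.foldl_cons]
    rw [ih]
    by_cases hc : c = ' ' <;> simp [pvPos, hc]

theorem pvUpdLast_cons2 (a b : List Int) (l : List (List Int)) (x : Int) :
    pvUpdLast (a :: b :: l) x = a :: pvUpdLast (b :: l) x := rfl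

theorem pvUpdLast_append (acc : List (List Int)) (a : List Int) (x : Int) :
    pvUpdLast (acc ++ [a]) x = acc ++ [a ++ [x]] := by
  induction acc with
  | nil => simp [pvUpdLast]
  | cons b acc ih =>
    cases acc with
    | nil => simp [pvUpdLast]
    | cons c acc =>
      rw [List.cons_append, List.cons_append, pvUpdLast_cons2, ← List.cons_append, ih]
      simp

theorem pvGGo_fold (sub : List Int) : ∀ (pre : List Int) (hpre : pre ≠ []) (grp : List (List Int)),
    (PySem.List.enumerate sub (pre.length : Int)).foldl
      (fun grp (iv : Int × Int) =>
        if iv.1 ≠ 0 then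
          if iv.2 - 1 ≠ PySem.List.pyGetD (pre ++ sub) (iv.1 - 1) 0 then
            pvUpdLast grp (PySem.List.pyGetD (pre ++ sub) (iv.1 - 1) 0) ++ [[iv.2]]
          else grp
        else grp) grp
    = pvGGo (pre.getLast hpre) grp sub := by
  induction sub with
  | nil => intro pre hpre grp; simp [pvGGo, PySem.List.enumerate_nil]
  | cons v vs ih =>
    intro pre hpre grp
    have hlen : 1 ≤ pre.length := by
      cases pre with | nil => exact absurd rfl hpre | cons _ _ => simp
    have hne : ((pre.length : Int)) ≠ 0 := by
      intro h; omega
    have hget : PySem.List.pyGetD (pre ++ v :: vs) ((pre.length : Int) - 1) 0 = pre.getLast hpre := by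
      have hcast : ((pre.length : Int) - 1) = ((pre.length - 1 : Nat) : Int) := by omega
      rw [hcast, PySem.List.pyGetD_natCast]
      have hlt : pre.length - 1 < pre.length := by omega
      simp [List.getD_eq_getElem?_getD, List.getElem?_append_left hlt,
        List.getElem?_eq_getElem hlt, List.getLast_eq_getElem]
    have hrest : pre ++ v :: vs = (pre ++ [v]) ++ vs := by simp
    simp only [PySem.List.enumerate_cons, List.foldl_cons, if_pos hne, hget]
    have hlast : (pre ++ [v]).getLast (by simp) = v := by simp
    have hlen2 : ((pre.length : Int) + 1) = (((pre ++ [v]).length : Nat) : Int) := by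
      simp
    by_cases hsplit : v - 1 ≠ pre.getLast hpre
    · rw [if_pos hsplit, hlen2]
      have := ih (pre ++ [v]) (by simp) (pvUpdLast grp (pre.getLast hpre) ++ [[v]])
      rw [hrest]
      rw [this, hlast]
      simp [pvGGo, if_pos hsplit]
    · rw [if_neg hsplit, hlen2, hrest]
      rw [ih (pre ++ [v]) (by simp) grp, hlast]
      simp [pvGGo, if_neg hsplit]

theorem pvLastPos_getLastD (cs : List Char) : ∀ (i prev : Int),
    (pvPos i cs).getLastD prev = pvLastPos prev i cs := by
  induction cs with
  | nil => intro i prev; simp [pvPos, pvLastPos]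
  | cons c cs ih =>
    intro i prev
    by_cases hc : c = ' '
    · subst hc
      simp only [pvPos, pvLastPos, if_neg (by decide : ¬((' ' : Char) ≠ ' '))]
      exact ih (i + 1) prev
    · simp only [pvPos, pvLastPos, if_pos hc]
      rw [List.getLastD_cons]
      exact ih (i + 1) i

theorem pvF_gap (cs : List Char) : ∀ (st prev i : Int), prev + 1 < i →
    pvF st prev i cs = [st, prev] :: pvRuns i cs := by
  induction cs with
  | nil => intro st prev i _; simp [pvF, pvRuns]
  | cons c cs ih =>
    intro st prev i h
    by_cases hc : c = ' '
    · subst hc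
      simp only [pvF, pvRuns, if_neg (by decide : ¬((' ' : Char) ≠ ' '))]
      exact ih st prev (i + 1) (by omega)
    · simp only [pvF, pvRuns, if_pos hc]
      rw [if_pos (by omega)]

theorem pvGGo_pvF (cs : List Char) : ∀ (i prev st : Int) (acc : List (List Int)), prev < i →
    pvUpdLast (pvGGo prev (acc ++ [[st]]) (pvPos i cs)) (pvLastPos prev i cs)
      = acc ++ pvF st prev i cs := by
  induction cs with
  | nil =>
    intro i prev st acc _
    simp [pvPos, pvGGo, pvLastPos, pvF, pvUpdLast_append acc [st] prev]
  | cons c cs ih =>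
    intro i prev st acc hlt
    by_cases hc : c = ' '
    · subst hc
      simp only [pvPos, pvLastPos, pvF, if_neg (by decide : ¬((' ' : Char) ≠ ' '))]
      exact ih (i + 1) prev st acc (by omega)
    · simp only [pvPos, pvLastPos, pvF, if_pos hc, pvGGo]
      by_cases hsplit : i - 1 ≠ prev
      · rw [if_pos hsplit, if_pos hsplit]
        rw [pvUpdLast_append acc [st] prev]
        have := ih (i + 1) i i ((acc ++ [[st, prev]])) (by omega)
        simpa using this
      · rw [if_neg hsplit, if_neg hsplit]
        exact ih (i + 1) i st acc (by omega)

theorem pvA_runs (cs : List Char) : ∀ (i : Int),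
    (match pvPos i cs with
     | [] => ([] : List (List Int))
     | p0 :: rest =>
       pvUpdLast (pvGGo p0 [[p0]] rest) ((pvPos i cs).getLastD 0))
    = pvRuns i cs := by
  induction cs with
  | nil => intro i; simp [pvPos, pvRuns]
  | cons c cs ih =>
    intro i
    by_cases hc : c = ' '
    · subst hc
      simp only [pvPos, pvRuns, if_neg (by decide : ¬((' ' : Char) ≠ ' '))]
      exact ih (i + 1)
    · simp only [pvPos, pvRuns, if_pos hc]
      have h := pvGGo_pvF cs (i + 1) i i [] (by omega)
      simp only [List.nil_append] at h
      rw [List.getLastD_cons, pvLastPos_getLastD]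
      exact h

-- B's final flush, as a function of the fold result and the end position
def pvFlush (r : Option Int × List (List Int)) (e : Int) : List (List Int) :=
  match r.1 with
  | some a => r.2 ++ [[a, e]]
  | none => r.2

theorem pvB_runs (cs : List Char) : ∀ (i : Int) (st? : Option Int) (acc : List (List Int)),
    (pvFlush ((PySem.List.enumerate cs i).foldl
      (fun (st : Option Int × List (List Int)) (ic : Int × Char) =>
        if ic.2 ≠ ' ' then
          match st.1 with
          | none => (some ic.1, st.2)
          | some _ => st
        else
          match st.1 with
          | some a => (none, st.2 ++ [[a, ic.1 - 1]])
          | none => st)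
      (st?, acc)) (i + (cs.length : Int) - 1))
    = (match st? with
       | none => acc ++ pvRuns i cs
       | some st => acc ++ pvF st (i - 1) i cs) := by
  induction cs with
  | nil =>
    intro i st? acc
    cases st? <;> simp [pvFlush, pvRuns, pvF, PySem.List.enumerate_nil]
  | cons c cs ih =>
    intro i st? acc
    have hlen : i + ((c :: cs).length : Int) - 1 = (i + 1) + (cs.length : Int) - 1 := by
      simp; omega
    have hsp : ¬((' ' : Char) ≠ ' ') := by decide
    by_cases hc : c = ' '
    · subst hc
      cases st? with
      | none =>
        simp only [PySem.List.enumerate_cons, List.foldl_cons, if_neg hsp, hlen]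
        have := ih (i + 1) none acc
        simp only at this
        rw [this]
        simp only [pvRuns, if_neg hsp]
      | some st =>
        simp only [PySem.List.enumerate_cons, List.foldl_cons, if_neg hsp, hlen]
        have := ih (i + 1) none (acc ++ [[st, i - 1]])
        simp only at this
        rw [this]
        simp only [pvF, if_neg hsp]
        rw [pvF_gap cs st (i - 1) (i + 1) (by omega)]
        simp
    · cases st? with
      | none =>
        simp only [PySem.List.enumerate_cons, List.foldl_cons, if_pos hc, hlen]
        have := ih (i + 1) (some i) acc
        simp only at this
        rw [this]
        simp only [pvRuns, if_pos hc]
        norm_num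
      | some st =>
        simp only [PySem.List.enumerate_cons, List.foldl_cons, if_pos hc, hlen]
        have := ih (i + 1) (some st) acc
        simp only at this
        rw [this]
        simp only [pvF, if_pos hc]
        rw [if_neg (by omega)]
        norm_num

theorem pvA_eq_runs (s : String) : detect_cont_string s = pvRuns 0 s.toList := by
  unfold detect_cont_string
  simp only [pvPos_fold s.toList 0 [], List.nil_append]
  rw [← pvA_runs s.toList 0]
  cases hpos : pvPos 0 s.toList with
  | nil => simp
  | cons p0 rest =>
    simp only
    congr 1
    · have h := pvGGo_fold rest [p0] (by simp) [[p0]]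
      simp only [List.length_cons, List.length_nil, List.singleton_append,
        List.getLast_singleton] at h
      rw [PySem.List.enumerate_cons, List.foldl_cons]
      rw [if_neg (by decide : ¬((0 : Int) ≠ 0))]
      norm_num at h ⊢
      exact h
    · rw [PySem.List.pyGetD_neg_one (p0 :: rest) 0 (by simp)]
      rw [List.getLast_eq_getLastD, List.getLastD_cons]

theorem pvB_eq_runs (s : String) : detect_cont_string_alt s = pvRuns 0 s.toList := by
  have h := pvB_runs s.toList 0 none []
  simp only [List.nil_append, zero_add] at h
  exact h

-- ===== VERDICT (by name: the statement is the Claim_ definition above) =====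
theorem detect_cont_string_spec : Claim_equal_detect_cont_string := by
  intro s _
  unfold Spec_detect_cont_string
  rw [pvA_eq_runs, pvB_eq_runs]
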